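-- pv_equiv track=rewrite | github.com/janki1997/Python-SSW_810- | HW_7/HW07_Janki_Patel.py | web_analyzer
-- ===== SOURCE A (Python) =====
-- from collections import defaultdict, Counter
-- from typing import Any, Optional, List, DefaultDict, Tuple
--
-- def web_analyzer(weblogs: List[Tuple[str, str]]) -> List[Tuple[str, List[str]]]:
--     """in that we do we analyzer and returns the list of values as the input as defaultdict(set)"""
--     output = defaultdict(set)
--     for i in weblogs:
--         name = i[0]
--         site = i[1]
--         output[site].add(name)
--     """return the s"""
--     s: bool = sorted([(key, sorted(list(value)))
--                      for key, value in output.items()])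
--     return s
-- ===== SOURCE B (Python) =====
-- def web_analyzer(weblogs):
--     """Group names by site: per-site set comprehensions over sorted distinct sites,
--     instead of a defaultdict(set) accumulation pass."""
--     sites = sorted({site for _, site in weblogs})
--     return [(site, sorted({name for name, s in weblogs if s == site}))
--             for site in sites]
-- ===== Notes on version B (the rewrite author's own statement) =====
-- stated objective: simpler
-- what changed: Replaced the defaultdict(set) accumulation pass plus sort of dict items by two plain comprehensions: sorted distinct sites, then a per-site set comprehension of names, so no dict is built at all.
import Mathlib
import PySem

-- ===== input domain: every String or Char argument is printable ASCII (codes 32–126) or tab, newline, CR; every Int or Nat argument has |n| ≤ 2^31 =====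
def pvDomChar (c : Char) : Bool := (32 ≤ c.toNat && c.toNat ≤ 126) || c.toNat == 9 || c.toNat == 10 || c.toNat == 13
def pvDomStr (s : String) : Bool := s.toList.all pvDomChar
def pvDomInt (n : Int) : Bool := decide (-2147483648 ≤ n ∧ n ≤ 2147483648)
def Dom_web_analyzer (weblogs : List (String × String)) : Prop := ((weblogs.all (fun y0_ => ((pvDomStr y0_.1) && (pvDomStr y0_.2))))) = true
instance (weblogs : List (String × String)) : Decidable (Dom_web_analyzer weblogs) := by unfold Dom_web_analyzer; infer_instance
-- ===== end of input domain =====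

-- B replaces A's defaultdict(set) accumulation (then sort of the dict items) by two plain
-- comprehensions — sorted distinct sites, then a per-site set comprehension of names (objective: simpler).

-- ===== PORT A =====
-- literal port of A: one defaultdict(set) pass, then sorted items with sorted name lists.
-- The dict's keys are pairwise distinct, so Python's tuple comparison in the outer sorted
-- never consults the second component; it is ported as the (stable) sort by the site key.
def web_analyzer (weblogs : List (String × String)) : List (String × List String) :=
  let output : PySem.Dict String (PySem.Set String) :=
    weblogs.foldl (fun d i =>
      let name := i.1
      let site := i.2
      d.insert site (PySem.Set.add (d.getD site PySem.Set.empty) name)) PySem.Dict.empty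
  PySem.List.sorted
    (output.items.map (fun kv => (kv.1, PySem.List.sorted kv.2 (fun x => x) false)))
    (fun p => p.1) false

-- ===== PORT B =====
def web_analyzer_alt (weblogs : List (String × String)) : List (String × List String) :=
  let sites := PySem.List.sorted (PySem.Set.ofList (weblogs.map (fun p => p.2))) (fun x => x) false
  sites.map (fun site =>
    (site, PySem.List.sorted
      (PySem.Set.ofList ((weblogs.filter (fun p => p.2 == site)).map (fun p => p.1)))
      (fun x => x) false))

-- ===== PRECONDITION & SPEC =====
def Spec_web_analyzer (weblogs : List (String × String)) (out : List (String × List String)) : Prop := out = web_analyzer_alt weblogs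
instance (weblogs : List (String × String)) (out : List (String × List String)) : Decidable (Spec_web_analyzer weblogs out) := by unfold Spec_web_analyzer; infer_instance

-- ===== CLAIM (what is proved, stated in full; the proofs are below) =====
def Claim_equal_web_analyzer : Prop := ∀ (weblogs : List (String × String)), Dom_web_analyzer weblogs → Spec_web_analyzer weblogs (web_analyzer weblogs)

-- ===== LEMMAS AND PROOFS =====

-- the dict-building step of A's loop
def waStep (d : PySem.Dict String (PySem.Set String)) (i : String × String) : PySem.Dict String (PySem.Set String) :=
  d.insert i.2 (PySem.Set.add (d.getD i.2 PySem.Set.empty) i.1)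

-- value stored at site s after the loop: all names logged for s, first occurrences in order
lemma waStep_getD (ws : List (String × String)) :
    ∀ (d : PySem.Dict String (PySem.Set String)) (s : String),
      (ws.foldl waStep d).getD s PySem.Set.empty =
        PySem.Set.update (d.getD s PySem.Set.empty)
          ((ws.filter (fun p => p.2 == s)).map (fun p => p.1)) := by
  induction ws with
  | nil => intro d s; rfl
  | cons p ws ih =>
    intro d s
    by_cases h : p.2 = s
    · simp only [List.foldl_cons, ih, waStep, List.filter_cons, h, beq_self_eq_true, if_true,
        List.map_cons, PySem.Dict.getD_insert]
      simp [PySem.Set.update]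
    · have hb : (p.2 == s) = false := by simp [h]
      simp only [List.foldl_cons, ih, waStep, List.filter_cons, hb,
        PySem.Dict.getD_insert]
      rw [if_neg (fun hs => h hs.symm)]
      simp

lemma waStep_keys (ws : List (String × String)) :
    (ws.foldl waStep PySem.Dict.empty).keys = PySem.Set.ofList (ws.map (fun p => p.2)) := by
  have h := PySem.Dict.keys_foldl_insert_key (l := ws) (key := fun i => i.2)
      (f := fun d i => PySem.Set.add (d.getD i.2 PySem.Set.empty) i.1)
      (d := (PySem.Dict.empty : PySem.Dict String (PySem.Set String)))
  simpa [waStep, PySem.Dict.keys_empty, PySem.Set.update_nil_left] using h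

lemma waStep_items (ws : List (String × String)) :
    (ws.foldl waStep PySem.Dict.empty).items =
      (PySem.Set.ofList (ws.map (fun p => p.2))).map (fun s =>
        (s, PySem.Set.ofList ((ws.filter (fun p => p.2 == s)).map (fun p => p.1)))) := by
  have hnd : (ws.foldl waStep PySem.Dict.empty).keys.Nodup := by
    rw [waStep_keys]; exact PySem.Set.nodup_ofList _
  have h := PySem.Dict.items_eq_map_keys (ws.foldl waStep PySem.Dict.empty) hnd PySem.Set.empty
  rw [h, waStep_keys]
  refine List.map_congr_left (fun s _ => ?_)
  rw [waStep_getD]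
  simp [PySem.Dict.getD_empty, PySem.Set.update_nil_left]

-- strict monotonicity in the site component of B's result
lemma alt_pairwise (ws : List (String × String)) (f : String → String × List String)
    (hf : ∀ s, (f s).1 = s) :
    ((PySem.List.sorted (PySem.Set.ofList (ws.map (fun p => p.2))) (fun x => x) false).map f).Pairwise
      (fun a b => a.1 < b.1) := by
  have h := PySem.List.sorted_ofList_pairwise_lt (xs := ws.map (fun p => p.2))
  exact List.Pairwise.map f (fun a b hab => by simpa [hf] using hab) h

theorem web_analyzer_eq (ws : List (String × String)) :
    web_analyzer ws = web_analyzer_alt ws := by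
  show PySem.List.sorted _ _ false = _
  have hitems := waStep_items ws
  have hfold : (ws.foldl (fun d i =>
      d.insert i.2 (PySem.Set.add (d.getD i.2 PySem.Set.empty) i.1)) PySem.Dict.empty) =
      ws.foldl waStep PySem.Dict.empty := rfl
  rw [hfold, hitems, List.map_map]
  set h : String → String × List String := fun s =>
    (s, PySem.List.sorted
      (PySem.Set.ofList ((ws.filter (fun p => p.2 == s)).map (fun p => p.1)))
      (fun x => x) false) with hh
  have hcomp : ((fun kv : String × PySem.Set String =>
        (kv.1, PySem.List.sorted kv.2 (fun x => x) false)) ∘ (fun s =>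
        (s, PySem.Set.ofList ((ws.filter (fun p => p.2 == s)).map (fun p => p.1))))) = h := rfl
  rw [hcomp]
  -- the target: B's list is a strictly key-increasing rearrangement of the sorted input
  apply PySem.List.sorted_eq_of_perm_of_pairwise_lt (key := fun p : String × List String => p.1)
  · exact List.Perm.map h (PySem.List.sorted_perm _ _ _)
  · exact alt_pairwise ws h (fun s => rfl)

-- ===== VERDICT (by name: the statement is the Claim_ definition above) =====
theorem web_analyzer_spec : Claim_equal_web_analyzer := by
  intro ws _
  show web_analyzer ws = web_analyzer_alt ws
  exact web_analyzer_eq ws
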